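-- pv_equiv track=rewrite | github.com/BharateshLabhagond/Text-steganography-using-AES-and-LSQ | app.py | embed_lsq_text
-- ===== SOURCE A (Python) =====
-- LSQ_1 = '\u200d'  # Zero-width joiner = 1
--
-- LSQ_0 = '\u200c'  # Zero-width non-joiner = 0
--
-- def embed_lsq_text(cover_text, encrypted_message):
--     binary_data = ''.join(format(ord(char), '08b') for char in encrypted_message)
--     stego_text = ""
--     index = 0
--     for bit in binary_data:
--         if index < len(cover_text):
--             stego_text += cover_text[index]
--             index += 1
--         stego_text += LSQ_1 if bit == '1' else LSQ_0
--     stego_text += cover_text[index:]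
--     return stego_text
-- ===== SOURCE B (Python) =====
-- LSQ_1 = '\u200d'  # Zero-width joiner = 1
--
-- LSQ_0 = '\u200c'  # Zero-width non-joiner = 0
--
-- def embed_lsq_text(cover_text, encrypted_message):
--     # Stage 1: marker string, one zero-width char per bit (bit arithmetic, MSB first).
--     markers = ''.join(LSQ_1 if (ord(ch) >> (7 - j)) & 1 else LSQ_0
--                       for ch in encrypted_message for j in range(8))
--     # Stage 2: preallocate the interleaved head and fill it by strided slice assignment.
--     k = min(len(cover_text), len(markers))
--     out = [''] * (2 * k)
--     out[0::2] = cover_text[:k]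
--     out[1::2] = markers[:k]
--     # Stage 3: exactly one of the two tails is non-empty; append both.
--     return ''.join(out) + markers[k:] + cover_text[k:]
-- ===== Notes on version B (the rewrite author's own statement) =====
-- stated objective: alternative
-- what changed: B replaces A's per-bit loop with guarded indexing and a trailing slice by three staged passes: build the whole marker string with bit arithmetic, fill a preallocated list by strided slice assignment (out[0::2]=cover[:k], out[1::2]=markers[:k]) to interleave the first k=min(len) characters, then append both tails.
import Mathlib
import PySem

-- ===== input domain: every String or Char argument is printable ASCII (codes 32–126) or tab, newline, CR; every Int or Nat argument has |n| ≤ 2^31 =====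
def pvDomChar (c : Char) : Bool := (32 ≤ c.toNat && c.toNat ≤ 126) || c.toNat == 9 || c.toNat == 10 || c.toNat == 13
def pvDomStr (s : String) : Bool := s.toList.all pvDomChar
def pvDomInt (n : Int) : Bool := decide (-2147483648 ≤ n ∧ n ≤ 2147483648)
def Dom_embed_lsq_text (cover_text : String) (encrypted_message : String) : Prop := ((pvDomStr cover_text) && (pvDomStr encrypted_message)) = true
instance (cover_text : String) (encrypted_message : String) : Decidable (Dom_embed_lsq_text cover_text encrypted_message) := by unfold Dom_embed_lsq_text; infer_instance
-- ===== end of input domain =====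

-- B interleaves via a preallocated strided slice-assignment over the first min-length
-- prefix and appends both tails, instead of A's per-bit guarded-index loop; objective: alternative.


-- ===== PORT A =====
def pvLSQ1 : Char := Char.ofNat 0x200d  -- zero-width joiner = 1
def pvLSQ0 : Char := Char.ofNat 0x200c  -- zero-width non-joiner = 0

-- format(ord(char), '08b'): the 8-bit binary string of a character code, MSB first
def pvBits8 (c : Char) : List Char :=
  (List.range 8).map (fun i => if Nat.testBit c.toNat (7 - i) then '1' else '0')

def embed_lsq_text (cover_text : String) (encrypted_message : String) : String :=
  let cover := cover_text.toList
  let binary_data := encrypted_message.toList.flatMap pvBits8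
  -- loop state: (stego_text, index)
  let r := binary_data.foldl (fun (s : List Char × Nat) bit =>
    let s := if s.2 < cover.length then (s.1 ++ [cover.getD s.2 ' '], s.2 + 1) else s
    (s.1 ++ [if bit = '1' then pvLSQ1 else pvLSQ0], s.2)) ([], 0)
  String.mk (r.1 ++ cover.drop r.2)   -- stego_text += cover_text[index:]

-- ===== PORT B =====
-- markers: one zero-width char per bit, via bit arithmetic (ord(ch) >> (7-j)) & 1
def pvMark8 (c : Char) : List Char :=
  (List.range 8).map (fun j => if (c.toNat >>> (7 - j)) &&& 1 = 1 then pvLSQ1 else pvLSQ0)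

-- out = ['']*(2k); out[0::2] = cover[:k]; out[1::2] = markers[:k]; ''.join(out)
-- exact for the equal-length (k,k) slices B assigns: the two strided assignments
-- produce the pairwise interleaving of the two length-k lists
def pvStridedFill : List Char → List Char → List Char
  | c :: cs, m :: ms => c :: m :: pvStridedFill cs ms
  | _, _ => []

def embed_lsq_text_alt (cover_text : String) (encrypted_message : String) : String :=
  let markers := encrypted_message.toList.flatMap pvMark8
  let cover := cover_text.toList
  let k := min cover.length markers.length
  String.mk (pvStridedFill (cover.take k) (markers.take k) ++ markers.drop k ++ cover.drop k)

-- ===== PRECONDITION & SPEC =====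
def Spec_embed_lsq_text (cover_text : String) (encrypted_message : String) (out : String) : Prop := out = embed_lsq_text_alt cover_text encrypted_message
instance (cover_text : String) (encrypted_message : String) (out : String) : Decidable (Spec_embed_lsq_text cover_text encrypted_message out) := by unfold Spec_embed_lsq_text; infer_instance

-- ===== CLAIM (what is proved, stated in full; the proofs are below) =====
def Claim_equal_embed_lsq_text : Prop := ∀ (cover_text : String) (encrypted_message : String), Dom_embed_lsq_text cover_text encrypted_message → Spec_embed_lsq_text cover_text encrypted_message (embed_lsq_text cover_text encrypted_message)

-- ===== LEMMAS AND PROOFS =====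

-- B's head-plus-tails expression, as a function of the two lists
def pvBShape (cs ms : List Char) : List Char :=
  pvStridedFill (cs.take (min cs.length ms.length)) (ms.take (min cs.length ms.length))
    ++ ms.drop (min cs.length ms.length) ++ cs.drop (min cs.length ms.length)

theorem pvBShape_nil_right (cs : List Char) : pvBShape cs [] = cs := by
  simp [pvBShape, pvStridedFill]

theorem pvBShape_nil_left (ms : List Char) : pvBShape [] ms = ms := by
  simp [pvBShape, pvStridedFill]

theorem pvBShape_cons (c m : Char) (cs ms : List Char) :
    pvBShape (c :: cs) (m :: ms) = c :: m :: pvBShape cs ms := by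
  simp [pvBShape, Nat.succ_min_succ, pvStridedFill]

-- Invariant of A's loop: running the fold from state (acc, idx) and then appending the
-- rest of the cover yields acc followed by B's shape on the unused cover and the
-- markers of the remaining bits.
theorem pvLoop_invariant (cover : List Char) (bits : List Char) :
    ∀ (acc : List Char) (idx : Nat),
    (let r := bits.foldl (fun (s : List Char × Nat) bit =>
        let s := if s.2 < cover.length then (s.1 ++ [cover.getD s.2 ' '], s.2 + 1) else s
        (s.1 ++ [if bit = '1' then pvLSQ1 else pvLSQ0], s.2)) (acc, idx)
     r.1 ++ cover.drop r.2)
    = acc ++ pvBShape (cover.drop idx)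
        (bits.map (fun b => if b = '1' then pvLSQ1 else pvLSQ0)) := by
  induction bits with
  | nil =>
    intro acc idx
    simp [List.foldl, pvBShape_nil_right]
  | cons b bs ih =>
    intro acc idx
    simp only [List.foldl_cons, List.map_cons]
    by_cases h : idx < cover.length
    · have hdrop : cover.drop idx = cover.getD idx ' ' :: cover.drop (idx + 1) := by
        rw [List.getD_eq_getElem _ _ h]
        exact (List.getElem_cons_drop h).symm
      simp only [if_pos h]
      rw [ih (acc ++ [cover.getD idx ' '] ++ [if b = '1' then pvLSQ1 else pvLSQ0]) (idx + 1)]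
      rw [hdrop, pvBShape_cons]
      simp
    · have hdrop : cover.drop idx = [] := List.drop_eq_nil_of_le (Nat.le_of_not_lt h)
      simp only [if_neg h]
      rw [ih (acc ++ [if b = '1' then pvLSQ1 else pvLSQ0]) idx]
      rw [hdrop, pvBShape_nil_left, pvBShape_nil_left]
      simp

-- A's bit characters, mapped to markers, are exactly B's markers
theorem pvBits8_map_eq_mark8 (c : Char) :
    (pvBits8 c).map (fun b => if b = '1' then pvLSQ1 else pvLSQ0) = pvMark8 c := by
  simp only [pvBits8, pvMark8, List.map_map]
  apply List.map_congr_left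
  intro i _
  have key : ((c.toNat >>> (7 - i)) &&& 1 = 1) ↔ Nat.testBit c.toNat (7 - i) := by
    rw [Nat.and_one_is_mod, Nat.testBit, Nat.one_and_eq_mod_two]
    simp
  by_cases h : Nat.testBit c.toNat (7 - i) = true
  · rw [Function.comp_apply, if_pos h, if_pos (key.mpr h)]
    rfl
  · rw [Function.comp_apply, if_neg h, if_neg (fun hx => h (key.mp hx))]
    rfl

-- ===== VERDICT (by name: the statement is the Claim_ definition above) =====
theorem embed_lsq_text_spec : Claim_equal_embed_lsq_text := by
  intro cover_text encrypted_message _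
  show _ = _
  unfold embed_lsq_text embed_lsq_text_alt
  simp only []
  rw [pvLoop_invariant cover_text.toList (encrypted_message.toList.flatMap pvBits8) [] 0]
  simp only [List.drop_zero, List.nil_append, List.map_flatMap]
  congr 1
  simp [pvBShape, List.flatMap_congr (fun c _ => pvBits8_map_eq_mark8 c)]
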